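-- pv_equiv track=rewrite | github.com/datwatikmaak/fluffy-octo-happiness | 149/words.py | sort_words_case_insensitively
-- ===== SOURCE A (Python) =====
-- def sort_words_case_insensitively(words):
--     """Sort the provided word list ignoring case, and numbers last
--        (1995, 19ab = numbers / Happy, happy4you = strings, hence for
--         numbers you only need to check the first char of the word)
--     """
--     numerics = []
--     alphabets = []
--
--     for word in words:
--
--         # checking and inserting in respective container
--         if word[0].isdigit():
--             numerics.append(word)
--         else:
--             alphabets.append(word)
--
--     # attaching lists post sort
--     return sorted(alphabets, key=str.casefold) + sorted(numerics)
-- ===== SOURCE B (Python) =====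
-- def sort_words_case_insensitively(words):
--     """Single stable sort with a compound key: non-digit-starting words first
--        (ordered by casefold), digit-starting words last (plain string order)."""
--     return sorted(
--         words,
--         key=lambda w: (w[0].isdigit(), w if w[0].isdigit() else w.casefold()),
--     )
-- ===== Notes on version B (the rewrite author's own statement) =====
-- stated objective: idiomatic
-- what changed: Replaces the explicit partition into two lists followed by two separate sorts and a concatenation with a single stable sorted() call over a compound (is-digit, casefolded-or-plain) key.
import Mathlib
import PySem

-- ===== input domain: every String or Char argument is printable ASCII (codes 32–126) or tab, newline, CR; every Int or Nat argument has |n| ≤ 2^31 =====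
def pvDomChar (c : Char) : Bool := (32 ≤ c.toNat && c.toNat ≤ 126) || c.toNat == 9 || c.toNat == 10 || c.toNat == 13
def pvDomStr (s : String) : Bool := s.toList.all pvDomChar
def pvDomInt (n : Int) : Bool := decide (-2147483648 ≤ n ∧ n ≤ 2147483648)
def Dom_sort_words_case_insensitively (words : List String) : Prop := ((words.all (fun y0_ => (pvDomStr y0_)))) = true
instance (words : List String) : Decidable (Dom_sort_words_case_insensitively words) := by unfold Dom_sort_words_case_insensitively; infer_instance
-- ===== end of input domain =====

-- B replaces A's partition-into-two-lists + two sorts + concatenation by one stable sort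
-- on a compound (is-digit, casefolded-or-plain) key: a simpler, more idiomatic decomposition.


-- shared transliteration of Python's `word[0].isdigit()`; the `none` branch is where
-- Python raises IndexError (word = ""), excluded by Pre_ below
def pvFirstDigit (w : String) : Bool :=
  match PySem.Str.pyGet? w 0 with
  | some c => PySem.Str.isdigit c
  | none => false

-- ===== PORT A =====
-- loop appending each word into (numerics, alphabets); sorted(alphabets, key=str.casefold)
-- + sorted(numerics).  str.casefold is ported as PySem.Str.lower: exact on the ASCII domain.
def sort_words_case_insensitively (words : List String) : List String :=
  let st := words.foldl
    (fun acc word =>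
      if pvFirstDigit word then (acc.1 ++ [word], acc.2) else (acc.1, acc.2 ++ [word]))
    (([] : List String), ([] : List String))
  PySem.List.sorted st.2 (fun w => PySem.Str.lower w) ++ PySem.List.sorted st.1 (fun w => w)

-- ===== PORT B =====
-- one sorted() call, tuple key (w[0].isdigit(), w if w[0].isdigit() else w.casefold())
def sort_words_case_insensitively_alt (words : List String) : List String :=
  PySem.List.sorted2 words pvFirstDigit
    (fun w => if pvFirstDigit w then w else PySem.Str.lower w)

-- ===== PRECONDITION & SPEC =====
-- Pre_ excludes lists containing an empty string, on which both Pythons raise IndexError at word[0].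
def Pre_sort_words_case_insensitively (words : List String) : Prop := ∀ w ∈ words, w ≠ ""
instance (words : List String) : Decidable (Pre_sort_words_case_insensitively words) := by
  unfold Pre_sort_words_case_insensitively; infer_instance

def pvWitness_sort_words_case_insensitively : List String := ["banana", "Apple", "2b", "cherry"]

def Spec_sort_words_case_insensitively (words : List String) (out : List String) : Prop := out = sort_words_case_insensitively_alt words
instance (words : List String) (out : List String) : Decidable (Spec_sort_words_case_insensitively words out) := by unfold Spec_sort_words_case_insensitively; infer_instance

-- ===== CLAIM (what is proved, stated in full; the proofs are below) =====
def Claim_equal_sort_words_case_insensitively : Prop := ∀ (words : List String), Dom_sort_words_case_insensitively words → Pre_sort_words_case_insensitively words → Spec_sort_words_case_insensitively words (sort_words_case_insensitively words)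

-- ===== LEMMAS AND PROOFS =====

lemma pvInsertBy_congr_mem {α : Type} (b1 b2 : α → α → Bool) (x : α) (l : List α)
    (h : ∀ y ∈ l, b1 x y = b2 x y) :
    PySem.List.insertBy b1 x l = PySem.List.insertBy b2 x l := by
  induction l with
  | nil => rfl
  | cons y ys ih =>
    simp only [PySem.List.insertBy]
    rw [h y (by simp)]
    split
    · rfl
    · rw [ih (fun z hz => h z (by simp [hz]))]

lemma pvInsertBy_append_false {α : Type} (b : α → α → Bool) (x : α) (l1 l2 : List α)
    (h : ∀ y ∈ l1, b x y = false) :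
    PySem.List.insertBy b x (l1 ++ l2) = l1 ++ PySem.List.insertBy b x l2 := by
  induction l1 with
  | nil => rfl
  | cons y ys ih =>
    simp only [List.cons_append, PySem.List.insertBy, h y (by simp)]
    simp [ih (fun z hz => h z (by simp [hz]))]

lemma pvInsertBy_append_true {α : Type} (b : α → α → Bool) (x : α) (l1 l2 : List α)
    (h : ∀ y ∈ l2, b x y = true) :
    PySem.List.insertBy b x (l1 ++ l2) = PySem.List.insertBy b x l1 ++ l2 := by
  induction l1 with
  | nil =>
    cases l2 with
    | nil => rfl
    | cons y ys => simp [PySem.List.insertBy, h y (by simp)]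
  | cons y ys ih =>
    simp only [List.cons_append, PySem.List.insertBy]
    split
    · rfl
    · simp [ih]

lemma pvFoldl_insertBy_congr {α : Type} (q : α → Bool) (b1 b2 : α → α → Bool)
    (xs : List α) (acc : List α)
    (hacc : ∀ y ∈ acc, q y = true) (hxs : ∀ x ∈ xs, q x = true)
    (h : ∀ a c, q a = true → q c = true → b1 a c = b2 a c) :
    xs.foldl (fun acc x => PySem.List.insertBy b1 x acc) acc
      = xs.foldl (fun acc x => PySem.List.insertBy b2 x acc) acc := by
  induction xs generalizing acc with
  | nil => rfl
  | cons x xs ih =>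
    simp only [List.foldl_cons]
    rw [pvInsertBy_congr_mem b1 b2 x acc
      (fun y hy => h x y (hxs x (by simp)) (hacc y hy))]
    exact ih _ (fun y hy => by
        rcases (PySem.List.mem_insertBy b2 x y acc).1 hy with rfl | hy
        · exact hxs y (by simp)
        · exact hacc y hy)
      (fun z hz => hxs z (by simp [hz]))

lemma pvSplit (k2 : String → String) (xs accF accT : List String)
    (hF : ∀ y ∈ accF, pvFirstDigit y = false) (hT : ∀ y ∈ accT, pvFirstDigit y = true) :
    xs.foldl
      (fun acc x => PySem.List.insertBy
        (fun a b => decide (pvFirstDigit a < pvFirstDigit b)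
          || (!decide (pvFirstDigit b < pvFirstDigit a) && decide (k2 a < k2 b))) x acc)
      (accF ++ accT)
    = (xs.filter (fun x => !pvFirstDigit x)).foldl
        (fun acc x => PySem.List.insertBy (fun a b => decide (k2 a < k2 b)) x acc) accF
      ++ (xs.filter pvFirstDigit).foldl
        (fun acc x => PySem.List.insertBy (fun a b => decide (k2 a < k2 b)) x acc) accT := by
  induction xs generalizing accF accT with
  | nil => rfl
  | cons x xs ih =>
    by_cases hx : pvFirstDigit x = true
    · simp only [List.foldl_cons, List.filter_cons, hx]
      rw [pvInsertBy_append_false _ x accF accT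
        (fun y hy => by simp [hx, hF y hy])]
      rw [pvInsertBy_congr_mem _ (fun a b => decide (k2 a < k2 b)) x accT
        (fun y hy => by simp [hx, hT y hy])]
      simp only [Bool.not_true]
      rw [ih accF _ hF (fun y hy => by
        rcases (PySem.List.mem_insertBy _ x y accT).1 hy with rfl | hy
        · exact hx
        · exact hT y hy)]
      simp
    · simp only [Bool.not_eq_true] at hx
      simp only [List.foldl_cons, List.filter_cons, hx]
      rw [pvInsertBy_append_true _ x accF accT
        (fun y hy => by simp [hx, hT y hy])]
      rw [pvInsertBy_congr_mem _ (fun a b => decide (k2 a < k2 b)) x accF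
        (fun y hy => by simp [hx, hF y hy])]
      rw [ih _ accT (fun y hy => by
        rcases (PySem.List.mem_insertBy _ x y accF).1 hy with rfl | hy
        · exact hx
        · exact hF y hy) hT]
      simp

lemma pvPartition (xs : List String) (n a : List String) :
    xs.foldl
      (fun acc w =>
        if pvFirstDigit w then (acc.1 ++ [w], acc.2) else (acc.1, acc.2 ++ [w]))
      (n, a)
    = (n ++ xs.filter pvFirstDigit, a ++ xs.filter (fun w => !pvFirstDigit w)) := by
  induction xs generalizing n a with
  | nil => simp
  | cons x xs ih =>
    by_cases hx : pvFirstDigit x = true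
    · simp [hx, ih]
    · simp only [Bool.not_eq_true] at hx
      simp [hx, ih]

-- ===== VERDICT (by name: the statement is the Claim_ definition above) =====
theorem sort_words_case_insensitively_spec : Claim_equal_sort_words_case_insensitively := by
  intro words _ _
  unfold Spec_sort_words_case_insensitively
  unfold sort_words_case_insensitively sort_words_case_insensitively_alt
  simp only [PySem.List.sorted2, Bool.false_eq_true, if_false]
  have hsplit := pvSplit (fun w => if pvFirstDigit w then w else PySem.Str.lower w) words [] []
    (by simp) (by simp)
  simp only [List.nil_append] at hsplit
  rw [hsplit, pvPartition]
  simp only [List.nil_append]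
  rw [PySem.List.sorted_eq_foldl_insertBy, PySem.List.sorted_eq_foldl_insertBy]
  congr 1
  · apply pvFoldl_insertBy_congr (fun w => !pvFirstDigit w)
    · simp
    · intro x hx; simp only [List.mem_filter] at hx; exact hx.2
    · intro a c ha hc
      simp only [Bool.not_eq_true'] at ha hc
      simp [ha, hc]
  · apply pvFoldl_insertBy_congr pvFirstDigit
    · simp
    · intro x hx; simp only [List.mem_filter] at hx; exact hx.2
    · intro a c ha hc
      simp [ha, hc]
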